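-- pv_equiv track=rewrite | github.com/SamanehGhafouri/leetcode | medium/above_70/triangle_sum.py | triangle_sum
-- ===== SOURCE A (Python) =====
-- from typing import List
--
-- def triangle_sum(nums: List[int]) -> int:
--     l = len(nums)
--     while l != 1:
--         for i in range(len(nums) - 1):
--             sum_nums = nums[i] + nums[i + 1]
--             if sum_nums >= 10:
--                 sum_nums %= 10
--             nums[i] = sum_nums
--         nums.pop()
--         l -= 1
--     return nums[0]
-- ===== SOURCE B (Python) =====
-- def triangle_sum(nums):
--     # One left-to-right pass over the input, maintaining the triangle's
--     # anti-diagonal (column DP) instead of repeatedly reducing rows in place.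
--     diag = []
--     for x in nums:
--         new = [x]
--         for prev in diag:
--             s = prev + new[-1]
--             new.append(s % 10 if s >= 10 else s)
--         diag = new
--     return diag[-1]
-- ===== Notes on version B (the rewrite author's own statement) =====
-- stated objective: alternative
-- what changed: B makes a single left-to-right pass over the input maintaining the triangle's anti-diagonal (column DP), instead of A's repeated in-place row reduction with pop; Pre_ excludes only the empty list, on which A raises IndexError (and B raises too).
import Mathlib
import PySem

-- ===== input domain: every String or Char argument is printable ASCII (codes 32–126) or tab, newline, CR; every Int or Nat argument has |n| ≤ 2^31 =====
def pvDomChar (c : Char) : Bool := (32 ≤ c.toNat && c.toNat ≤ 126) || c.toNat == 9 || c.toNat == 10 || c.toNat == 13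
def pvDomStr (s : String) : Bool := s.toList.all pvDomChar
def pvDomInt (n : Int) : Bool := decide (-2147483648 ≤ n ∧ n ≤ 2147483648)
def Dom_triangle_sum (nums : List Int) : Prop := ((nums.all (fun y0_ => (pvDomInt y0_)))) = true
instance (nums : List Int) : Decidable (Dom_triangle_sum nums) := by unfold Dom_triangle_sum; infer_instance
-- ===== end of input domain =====

-- B changes the traversal: one left-to-right pass maintaining the triangle's anti-diagonal
-- (column DP) instead of A's repeated in-place row reduction; same O(n^2) cost (alternative).
-- A mutates its argument in place (and pops from it); the equivalence is about the return value only.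

-- ===== PORT A =====
-- the inner `for i in range(len(nums)-1)` loop: nums[i] = h(nums[i]+nums[i+1]); each step
-- reads the not-yet-updated right neighbour, so it is exactly this pairwise recursion
def tsRow : List Int → List Int
  | a :: b :: t =>
      (if a + b ≥ 10 then PySem.Int.mod (a + b) 10 else a + b) :: tsRow (b :: t)
  | xs => xs

theorem tsRow_length (xs : List Int) : (tsRow xs).length = xs.length := by
  match xs with
  | [] => rfl
  | [a] => rfl
  | a :: b :: t => simp [tsRow, tsRow_length (b :: t)]

-- the `while l != 1` loop; `nums.pop()` is dropLast.  Python raises on [] (pop from empty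
-- list), which Pre_ excludes; there this recursion just returns [].
def tsLoop (nums : List Int) : List Int :=
  if nums.length ≤ 1 then nums
  else tsLoop ((tsRow nums).dropLast)
termination_by nums.length
decreasing_by
  have := tsRow_length nums
  simp_all [List.length_dropLast]
  omega

def triangle_sum (nums : List Int) : Int := (tsLoop nums).headI   -- return nums[0]

-- ===== PORT B =====
-- the inner `for prev in diag` loop: appends h(prev + new[-1]) and threads the last value
def tsBuild (last : Int) : List Int → List Int
  | [] => []
  | p :: rest =>
      (if p + last ≥ 10 then PySem.Int.mod (p + last) 10 else p + last) ::
        tsBuild (if p + last ≥ 10 then PySem.Int.mod (p + last) 10 else p + last) rest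

def triangle_sum_alt (nums : List Int) : Int :=
  (nums.foldl (fun diag x => x :: tsBuild x diag) []).getLastD 0   -- return diag[-1]

-- ===== PRECONDITION & SPEC =====
-- Pre_ excludes only the empty list, on which Python A raises IndexError (pop from empty list)
def Pre_triangle_sum (nums : List Int) : Prop := nums ≠ []
instance (nums : List Int) : Decidable (Pre_triangle_sum nums) := by
  unfold Pre_triangle_sum; infer_instance

def pvWitness_triangle_sum : List Int := ([1, 2, 3] : List Int)

def Spec_triangle_sum (nums : List Int) (out : Int) : Prop := out = triangle_sum_alt nums
instance (nums : List Int) (out : Int) : Decidable (Spec_triangle_sum nums out) := by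
  unfold Spec_triangle_sum; infer_instance

-- ===== CLAIM (what is proved, stated in full; the proofs are below) =====
def Claim_equal_triangle_sum : Prop :=
  ∀ (nums : List Int), Dom_triangle_sum nums → Pre_triangle_sum nums →
    Spec_triangle_sum nums (triangle_sum nums)

-- ===== LEMMAS AND PROOFS =====

-- one full row-reduction round of A: pairwise step then pop
def redu (xs : List Int) : List Int := (tsRow xs).dropLast

def dig (s : Int) : Int := if s ≥ 10 then PySem.Int.mod s 10 else s

theorem redu_length (xs : List Int) : (redu xs).length = xs.length - 1 := by
  simp [redu, List.length_dropLast, tsRow_length]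

theorem iter_redu_length (r : Nat) (xs : List Int) :
    ((redu^[r]) xs).length = xs.length - r := by
  induction r generalizing xs with
  | zero => simp
  | succ n ih =>
      rw [Function.iterate_succ_apply]
      rw [ih (redu xs), redu_length]
      omega

theorem tsLoop_eq_iter (xs : List Int) (h : 1 ≤ xs.length) :
    tsLoop xs = (redu^[xs.length - 1]) xs := by
  by_cases h1 : xs.length ≤ 1
  · have : xs.length = 1 := le_antisymm h1 h
    rw [tsLoop, if_pos h1, this]
    simp
  · rw [tsLoop, if_neg h1]
    have hl : (redu xs).length = xs.length - 1 := redu_length xs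
    have h2 : 1 ≤ (redu xs).length := by omega
    have := tsLoop_eq_iter (redu xs) h2
    rw [show (tsRow xs).dropLast = redu xs from rfl, this, hl]
    rw [← Function.iterate_succ_apply]
    congr 1
    omega
termination_by xs.length
decreasing_by
  rw [redu_length]; omega

theorem tsRow_ne_nil (xs : List Int) (h : xs ≠ []) : tsRow xs ≠ [] := by
  intro hc
  have := tsRow_length xs
  rw [hc] at this
  exact h (List.length_eq_zero_iff.mp this.symm)

theorem redu_append (xs : List Int) (x : Int) (h : xs ≠ []) :
    redu (xs ++ [x]) = redu xs ++ [dig (xs.getLastD 0 + x)] := by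
  match xs with
  | [a] => simp [redu, tsRow, dig]
  | a :: b :: t =>
      have ih := redu_append (b :: t) x (by simp)
      simp only [redu, List.cons_append] at ih ⊢
      have e1 : tsRow (a :: b :: (t ++ [x])) =
          (if a + b ≥ 10 then PySem.Int.mod (a + b) 10 else a + b) ::
            tsRow (b :: (t ++ [x])) := by
        simp [tsRow]
      have e2 : tsRow (a :: b :: t) =
          (if a + b ≥ 10 then PySem.Int.mod (a + b) 10 else a + b) ::
            tsRow (b :: t) := by
        simp [tsRow]
      rw [e1, e2,
        List.dropLast_cons_of_ne_nil (tsRow_ne_nil (b :: (t ++ [x])) (by simp)),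
        List.dropLast_cons_of_ne_nil (tsRow_ne_nil (b :: t) (by simp)),
        List.cons_append, ih]
      simp

-- the value appended on top of column r after consuming one more element x
def cseq (xs : List Int) (x : Int) : Nat → Int
  | 0 => x
  | r + 1 => dig (((redu^[r]) xs).getLastD 0 + cseq xs x r)

theorem iter_redu_append (xs : List Int) (x : Int) (r : Nat) (hr : r ≤ xs.length)
    (hx : xs ≠ []) :
    (redu^[r]) (xs ++ [x]) = (redu^[r]) xs ++ [cseq xs x r] := by
  induction r with
  | zero => simp [cseq]
  | succ n ih =>
      have hn : n ≤ xs.length := by omega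
      rw [Function.iterate_succ_apply', Function.iterate_succ_apply',
        ih hn]
      have hne : (redu^[n]) xs ≠ [] := by
        have := iter_redu_length n xs
        intro hc
        rw [hc] at this
        simp at this
        have hl : 0 < xs.length := List.length_pos_iff.mpr hx
        omega
      rw [redu_append _ _ hne]
      rfl

theorem tsBuild_cseq (xs : List Int) (x : Int) (m j : Nat) :
    tsBuild (cseq xs x j)
        ((List.range' j m).map (fun r => ((redu^[r]) xs).getLastD 0)) =
      (List.range' (j + 1) m).map (cseq xs x) := by
  induction m generalizing j with
  | zero => simp [tsBuild]
  | succ n ih =>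
      rw [List.range'_succ, List.range'_succ]
      simp only [List.map_cons, tsBuild]
      have hstep : (if ((redu^[j]) xs).getLastD 0 + cseq xs x j ≥ 10 then
          PySem.Int.mod (((redu^[j]) xs).getLastD 0 + cseq xs x j) 10
          else ((redu^[j]) xs).getLastD 0 + cseq xs x j) = cseq xs x (j + 1) := by
        simp [cseq, dig]
      rw [hstep, ih (j + 1)]

def diagOf (xs : List Int) : List Int :=
  (List.range xs.length).map (fun r => ((redu^[r]) xs).getLastD 0)

theorem foldl_diag (xs : List Int) :
    List.foldl (fun diag x => x :: tsBuild x diag) [] xs = diagOf xs := by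
  induction xs using List.reverseRecOn with
  | nil => simp [diagOf]
  | append_singleton ys y ih =>
      rw [List.foldl_append, List.foldl_cons, List.foldl_nil, ih]
      by_cases hys : ys = []
      · subst hys
        simp [diagOf, tsBuild]
      · -- diagOf (ys ++ [y]) = map (cseq ys y) (range (len+1)); entry r is cseq r
        have hlen : (ys ++ [y]).length = ys.length + 1 := by simp
        have hentry : ∀ r ∈ List.range (ys.length + 1),
            ((redu^[r]) (ys ++ [y])).getLastD 0 = cseq ys y r := by
          intro r hr
          rw [List.mem_range] at hr
          rw [iter_redu_append ys y r (by omega) hys]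
          exact List.getLastD_concat
        have hdiag : diagOf (ys ++ [y]) = (List.range (ys.length + 1)).map (cseq ys y) := by
          unfold diagOf
          rw [hlen]
          exact List.map_congr_left hentry
        rw [hdiag]
        unfold diagOf
        rw [List.range_eq_range', List.range_eq_range']
        have := tsBuild_cseq ys y ys.length 0
        rw [show cseq ys y 0 = y from rfl] at this
        rw [this, List.range'_succ, List.map_cons]
        rfl

theorem headI_eq_getLastD_of_len_one (l : List Int) (h : l.length = 1) :
    l.headI = l.getLastD 0 := by
  match l with
  | [a] => rfl

-- ===== VERDICT (by name: the statement is the Claim_ definition above) =====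
theorem triangle_sum_spec : Claim_equal_triangle_sum := by
  intro nums _ hpre
  unfold Spec_triangle_sum triangle_sum triangle_sum_alt
  have hlen0 : 0 < nums.length := List.length_pos_iff.mpr hpre
  have hlen : 1 ≤ nums.length := hlen0
  rw [tsLoop_eq_iter nums hlen, foldl_diag]
  have hfin : ((redu^[nums.length - 1]) nums).length = 1 := by
    rw [iter_redu_length]; omega
  rw [headI_eq_getLastD_of_len_one _ hfin]
  -- last entry of diagOf nums is the r = len-1 entry
  unfold diagOf
  obtain ⟨m, hm⟩ : ∃ m, nums.length = m + 1 := ⟨nums.length - 1, by omega⟩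
  rw [hm, List.range_succ, List.map_append, List.map_cons, List.map_nil,
    List.getLastD_concat]
  simp
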